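-- pv_equiv track=rewrite | github.com/winjher/lepvision | src/modules/larval_stages.py | get_larval_stages
-- ===== SOURCE A (Python) =====
-- from typing import Dict, Any, List
--
-- LIFECYCLE_DURATIONS: Dict[str, List[int]] = {
--     "Butterfly-Clippers": [3, 4, 4, 5, 6, 15],
--     "Butterfly-Common Jay": [4, 5, 4, 6, 7, 12],
--     "Butterfly-Common Lime": [2, 2, 2, 2, 2, 14],
--     "Butterfly-Common Mime": [4, 4, 5, 5, 6, 18],
--     "Butterfly-Common Mormon": [3, 4, 5, 5, 6, 16],
--     "Butterfly-Emerald Swallowtail": [4, 4, 5, 6, 7, 15],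
--     "Butterfly-Golden Birdwing": [5, 6, 7, 8, 9, 25],
--     "Butterfly-Gray Glassy Tiger": [3, 4, 4, 5, 5, 13],
--     "Butterfly-Great Eggfly": [4, 5, 6, 6, 7, 20],
--     "Butterfly-Great Yellow Mormon": [3, 4, 5, 6, 7, 17],
--     "Butterfly-Paper Kite": [3, 4, 5, 5, 6, 19],
--     "Butterfly-Pink Rose": [4, 5, 5, 6, 7, 15],
--     "Butterfly-Plain Tiger": [3, 4, 4, 5, 5, 12],
--     "Butterfly-Red Lacewing": [4, 5, 5, 6, 7, 14],
--     "Butterfly-Scarlet Mormon": [3, 4, 5, 5, 6, 16],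
--     "Butterfly-Tailed Jay": [4, 5, 5, 6, 7, 13],
--     "Moth-Atlas": [7, 8, 9, 10, 12, 30],
--     "Moth-Giant Silk": [6, 7, 8, 9, 10, 25]
-- }
--
-- def get_larval_stages(species_name: str, days_passed: int) -> str:
--     """
--     Determines the current lifecycle stage of a species based on the number of days since hatching.
--     """
--     if species_name not in LIFECYCLE_DURATIONS:
--         return f"Error: '{species_name}' data not available. Please choose from the provided list."
--
--     durations = LIFECYCLE_DURATIONS[species_name]
--     instar_days = durations[:5]
--     pupa_duration = durations[5]
--
--     cumulative_days = 0
--     # Check Instar stages (5 stages)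
--     for i in range(5):
--         cumulative_days += instar_days[i]
--         if days_passed <= cumulative_days:
--             return f"The {species_name} is currently in **Instar {i + 1}**."
--
--     # Check Pupa stage
--     pupa_start_day = cumulative_days
--     pupa_end_day = pupa_start_day + pupa_duration
--
--     if days_passed <= pupa_end_day:
--         days_in_pupa = days_passed - pupa_start_day
--         return f"The {species_name} is a **pupa**. It has been in this stage for **{days_in_pupa}** days."
--
--     # Must be adult stage
--     return f"The {species_name} has **emerged as an adult**."
-- ===== SOURCE B (Python) =====
-- from typing import Dict, List
-- from itertools import accumulate
-- from bisect import bisect_left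
--
-- LIFECYCLE_DURATIONS: Dict[str, List[int]] = {
--     "Butterfly-Clippers": [3, 4, 4, 5, 6, 15],
--     "Butterfly-Common Jay": [4, 5, 4, 6, 7, 12],
--     "Butterfly-Common Lime": [2, 2, 2, 2, 2, 14],
--     "Butterfly-Common Mime": [4, 4, 5, 5, 6, 18],
--     "Butterfly-Common Mormon": [3, 4, 5, 5, 6, 16],
--     "Butterfly-Emerald Swallowtail": [4, 4, 5, 6, 7, 15],
--     "Butterfly-Golden Birdwing": [5, 6, 7, 8, 9, 25],
--     "Butterfly-Gray Glassy Tiger": [3, 4, 4, 5, 5, 13],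
--     "Butterfly-Great Eggfly": [4, 5, 6, 6, 7, 20],
--     "Butterfly-Great Yellow Mormon": [3, 4, 5, 6, 7, 17],
--     "Butterfly-Paper Kite": [3, 4, 5, 5, 6, 19],
--     "Butterfly-Pink Rose": [4, 5, 5, 6, 7, 15],
--     "Butterfly-Plain Tiger": [3, 4, 4, 5, 5, 12],
--     "Butterfly-Red Lacewing": [4, 5, 5, 6, 7, 14],
--     "Butterfly-Scarlet Mormon": [3, 4, 5, 5, 6, 16],
--     "Butterfly-Tailed Jay": [4, 5, 5, 6, 7, 13],
--     "Moth-Atlas": [7, 8, 9, 10, 12, 30],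
--     "Moth-Giant Silk": [6, 7, 8, 9, 10, 25]
-- }
--
-- def get_larval_stages(species_name: str, days_passed: int) -> str:
--     if species_name not in LIFECYCLE_DURATIONS:
--         return f"Error: '{species_name}' data not available. Please choose from the provided list."
--     thresholds = list(accumulate(LIFECYCLE_DURATIONS[species_name]))
--     i = bisect_left(thresholds, days_passed)
--     if i < 5:
--         return f"The {species_name} is currently in **Instar {i + 1}**."
--     if i == 5:
--         days_in_pupa = days_passed - thresholds[4]
--         return f"The {species_name} is a **pupa**. It has been in this stage for **{days_in_pupa}** days."
--     return f"The {species_name} has **emerged as an adult**."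
-- ===== Notes on version B (the rewrite author's own statement) =====
-- stated objective: idiomatic
-- what changed: Replaces A's forward-accumulating linear scan with early returns by building the cumulative-threshold table once (itertools.accumulate) and locating the stage bucket with bisect_left, then reading the stage off the bucket index.
import Mathlib
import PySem

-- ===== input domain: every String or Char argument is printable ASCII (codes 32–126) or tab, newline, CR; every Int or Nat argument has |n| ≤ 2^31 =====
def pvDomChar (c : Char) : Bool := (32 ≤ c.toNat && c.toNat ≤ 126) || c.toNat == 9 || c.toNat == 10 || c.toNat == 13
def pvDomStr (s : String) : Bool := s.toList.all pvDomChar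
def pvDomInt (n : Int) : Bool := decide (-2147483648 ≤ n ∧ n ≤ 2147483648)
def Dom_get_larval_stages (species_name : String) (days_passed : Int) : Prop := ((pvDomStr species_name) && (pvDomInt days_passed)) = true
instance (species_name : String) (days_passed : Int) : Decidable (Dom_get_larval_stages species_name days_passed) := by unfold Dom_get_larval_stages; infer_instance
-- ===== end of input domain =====

-- B replaces A's forward-accumulating linear scan by a prefix-sum table (itertools.accumulate)
-- plus a binary search (bisect_left); objective: idiomatic (not faster on 6 fixed entries).

-- ===== PORT A =====
def LIFECYCLE_DURATIONS : PySem.Dict String (List Int) := PySem.Dict.ofList [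
  ("Butterfly-Clippers", [3, 4, 4, 5, 6, 15]),
  ("Butterfly-Common Jay", [4, 5, 4, 6, 7, 12]),
  ("Butterfly-Common Lime", [2, 2, 2, 2, 2, 14]),
  ("Butterfly-Common Mime", [4, 4, 5, 5, 6, 18]),
  ("Butterfly-Common Mormon", [3, 4, 5, 5, 6, 16]),
  ("Butterfly-Emerald Swallowtail", [4, 4, 5, 6, 7, 15]),
  ("Butterfly-Golden Birdwing", [5, 6, 7, 8, 9, 25]),
  ("Butterfly-Gray Glassy Tiger", [3, 4, 4, 5, 5, 13]),
  ("Butterfly-Great Eggfly", [4, 5, 6, 6, 7, 20]),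
  ("Butterfly-Great Yellow Mormon", [3, 4, 5, 6, 7, 17]),
  ("Butterfly-Paper Kite", [3, 4, 5, 5, 6, 19]),
  ("Butterfly-Pink Rose", [4, 5, 5, 6, 7, 15]),
  ("Butterfly-Plain Tiger", [3, 4, 4, 5, 5, 12]),
  ("Butterfly-Red Lacewing", [4, 5, 5, 6, 7, 14]),
  ("Butterfly-Scarlet Mormon", [3, 4, 5, 5, 6, 16]),
  ("Butterfly-Tailed Jay", [4, 5, 5, 6, 7, 13]),
  ("Moth-Atlas", [7, 8, 9, 10, 12, 30]),
  ("Moth-Giant Silk", [6, 7, 8, 9, 10, 25])]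

-- A's 'for i in range(5)' with early return: result is (some message, cumulative) on return,
-- (none, cumulative) when the loop falls through.
def aInstarLoop (species_name : String) (days_passed : Int) (instar_days : List Int) :
    List Int → Int → Option String × Int
  | [], cumulative => (none, cumulative)
  | i :: rest, cumulative =>
    let c := cumulative + (PySem.List.pyGet? instar_days i).getD 0  -- exact: 0 ≤ i < 5 = len(instar_days)
    if days_passed ≤ c then
      (some ("The " ++ species_name ++ " is currently in **Instar " ++ PySem.Int.toStr (i + 1) ++ "**."), c)
    else aInstarLoop species_name days_passed instar_days rest c

def aStage (species_name : String) (days_passed : Int) (durations : List Int) : String :=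
  let instar_days := PySem.List.slice durations none (some 5)
  let pupa_duration := (PySem.List.pyGet? durations 5).getD 0  -- exact: every dict value has 6 entries
  match aInstarLoop species_name days_passed instar_days (PySem.List.pyRange 0 5 1) 0 with
  | (some msg, _) => msg
  | (none, cumulative) =>
    let pupa_start_day := cumulative
    let pupa_end_day := pupa_start_day + pupa_duration
    if days_passed ≤ pupa_end_day then
      "The " ++ species_name ++ " is a **pupa**. It has been in this stage for **" ++
        PySem.Int.toStr (days_passed - pupa_start_day) ++ "** days."
    else "The " ++ species_name ++ " has **emerged as an adult**."

def get_larval_stages (species_name : String) (days_passed : Int) : String :=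
  if !(LIFECYCLE_DURATIONS.contains species_name) then
    "Error: '" ++ species_name ++ "' data not available. Please choose from the provided list."
  else
    aStage species_name days_passed ((LIFECYCLE_DURATIONS.get? species_name).getD [])  -- exact: key present

-- ===== PORT B =====
def bStage (species_name : String) (days_passed : Int) (durations : List Int) : String :=
  -- list(itertools.accumulate(durations)) = running prefix sums
  let thresholds := (durations.scanl (· + ·) 0).tail
  let i := PySem.List.bisectLeft thresholds days_passed
  if i < 5 then
    "The " ++ species_name ++ " is currently in **Instar " ++ PySem.Int.toStr ((i : Int) + 1) ++ "**."
  else if i = 5 then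
    "The " ++ species_name ++ " is a **pupa**. It has been in this stage for **" ++
      PySem.Int.toStr (days_passed - (PySem.List.pyGet? thresholds 4).getD 0) ++ "** days."
  else "The " ++ species_name ++ " has **emerged as an adult**."

def get_larval_stages_alt (species_name : String) (days_passed : Int) : String :=
  if !(LIFECYCLE_DURATIONS.contains species_name) then
    "Error: '" ++ species_name ++ "' data not available. Please choose from the provided list."
  else
    bStage species_name days_passed ((LIFECYCLE_DURATIONS.get? species_name).getD [])  -- exact: key present

-- ===== PRECONDITION & SPEC =====
def Spec_get_larval_stages (species_name : String) (days_passed : Int) (out : String) : Prop := out = get_larval_stages_alt species_name days_passed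
instance (species_name : String) (days_passed : Int) (out : String) : Decidable (Spec_get_larval_stages species_name days_passed out) := by unfold Spec_get_larval_stages; infer_instance

-- ===== CLAIM (what is proved, stated in full; the proofs are below) =====
def Claim_equal_get_larval_stages : Prop := ∀ (species_name : String) (days_passed : Int), Dom_get_larval_stages species_name days_passed → Spec_get_larval_stages species_name days_passed (get_larval_stages species_name days_passed)

-- ===== LEMMAS AND PROOFS =====

theorem bisect6 (t0 t1 t2 t3 t4 t5 d : Int)
    (s01 : t0 ≤ t1) (s12 : t1 ≤ t2) (s23 : t2 ≤ t3) (s34 : t3 ≤ t4) (s45 : t4 ≤ t5) :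
    PySem.List.bisectLeft [t0, t1, t2, t3, t4, t5] d =
      if d ≤ t0 then 0 else if d ≤ t1 then 1 else if d ≤ t2 then 2
      else if d ≤ t3 then 3 else if d ≤ t4 then 4 else if d ≤ t5 then 5 else 6 := by
  have hp : List.Pairwise (· ≤ ·) [t0, t1, t2, t3, t4, t5] := by
    simp only [List.pairwise_cons, List.mem_cons, List.not_mem_nil, or_false, List.Pairwise.nil,
      and_true]
    constructor
    · rintro a (rfl | rfl | rfl | rfl | rfl) <;> omega
    constructor
    · rintro a (rfl | rfl | rfl | rfl) <;> omega
    constructor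
    · rintro a (rfl | rfl | rfl) <;> omega
    constructor
    · rintro a (rfl | rfl) <;> omega
    constructor
    · rintro a rfl; omega
    simp
  obtain ⟨hle, hlt, hge⟩ := PySem.List.bisectLeft_spec [t0, t1, t2, t3, t4, t5] d hp
  simp only [List.length_cons, List.length_nil] at hle hlt hge
  have L0 : 0 < PySem.List.bisectLeft [t0, t1, t2, t3, t4, t5] d → t0 < d := fun h => by simpa using hlt 0 (by omega) h
  have G0 : PySem.List.bisectLeft [t0, t1, t2, t3, t4, t5] d ≤ 0 → d ≤ t0 := fun h => by simpa using hge 0 (by omega) h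
  have L1 : 1 < PySem.List.bisectLeft [t0, t1, t2, t3, t4, t5] d → t1 < d := fun h => by simpa using hlt 1 (by omega) h
  have G1 : PySem.List.bisectLeft [t0, t1, t2, t3, t4, t5] d ≤ 1 → d ≤ t1 := fun h => by simpa using hge 1 (by omega) h
  have L2 : 2 < PySem.List.bisectLeft [t0, t1, t2, t3, t4, t5] d → t2 < d := fun h => by simpa using hlt 2 (by omega) h
  have G2 : PySem.List.bisectLeft [t0, t1, t2, t3, t4, t5] d ≤ 2 → d ≤ t2 := fun h => by simpa using hge 2 (by omega) h
  have L3 : 3 < PySem.List.bisectLeft [t0, t1, t2, t3, t4, t5] d → t3 < d := fun h => by simpa using hlt 3 (by omega) h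
  have G3 : PySem.List.bisectLeft [t0, t1, t2, t3, t4, t5] d ≤ 3 → d ≤ t3 := fun h => by simpa using hge 3 (by omega) h
  have L4 : 4 < PySem.List.bisectLeft [t0, t1, t2, t3, t4, t5] d → t4 < d := fun h => by simpa using hlt 4 (by omega) h
  have G4 : PySem.List.bisectLeft [t0, t1, t2, t3, t4, t5] d ≤ 4 → d ≤ t4 := fun h => by simpa using hge 4 (by omega) h
  have L5 : 5 < PySem.List.bisectLeft [t0, t1, t2, t3, t4, t5] d → t5 < d := fun h => by simpa using hlt 5 (by omega) h
  have G5 : PySem.List.bisectLeft [t0, t1, t2, t3, t4, t5] d ≤ 5 → d ≤ t5 := fun h => by simpa using hge 5 (by omega) h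
  split_ifs <;> omega


-- core: for any six positive stage durations, A's linear scan and B's bisected prefix table agree
set_option maxHeartbeats 1000000 in
theorem stage_eq (s : String) (d a1 a2 a3 a4 a5 a6 : Int)
    (_h1 : 0 < a1) (h2 : 0 < a2) (h3 : 0 < a3) (h4 : 0 < a4) (h5 : 0 < a5) (h6 : 0 < a6) :
    aStage s d [a1, a2, a3, a4, a5, a6] = bStage s d [a1, a2, a3, a4, a5, a6] := by
  have hr : PySem.List.pyRange 0 5 1 = [0, 1, 2, 3, 4] := by decide
  simp only [aStage, bStage, hr, aInstarLoop, List.scanl, List.tail, zero_add,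
    PySem.List.slice, PySem.List.pyGet?, PySem.List.pyIdx?]
  norm_num [List.getElem?_cons_zero, List.getElem?_cons_succ, List.getElem_cons_zero,
    List.getElem_cons_succ, Option.bind, Option.getD, List.take]
  simp only [show Int.toNat 2 = 2 from rfl, show Int.toNat 3 = 3 from rfl, show Int.toNat 4 = 4 from rfl,
    show Int.toNat 5 = 5 from rfl, List.getElem_cons_zero, List.getElem_cons_succ]
  rw [bisect6 a1 (a1 + a2) (a1 + a2 + a3) (a1 + a2 + a3 + a4) (a1 + a2 + a3 + a4 + a5)
    (a1 + a2 + a3 + a4 + a5 + a6) d (by omega) (by omega) (by omega) (by omega) (by omega)]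
  split_ifs <;> first | rfl | omega | (exact if_pos (by omega)) | (exact if_neg (by omega))


-- ===== VERDICT (by name: the statement is the Claim_ definition above) =====
theorem get_larval_stages_spec : Claim_equal_get_larval_stages := by
  intro s d _
  unfold Spec_get_larval_stages
  by_cases h0 : s = "Butterfly-Clippers"
  · subst h0
    have hc : (!LIFECYCLE_DURATIONS.contains "Butterfly-Clippers") = false := by decide
    have hd : (LIFECYCLE_DURATIONS.get? "Butterfly-Clippers").getD ([] : List Int) = [3, 4, 4, 5, 6, 15] := by decide
    simp only [get_larval_stages, get_larval_stages_alt, hc, Bool.false_eq_true, if_false, hd]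
    exact stage_eq _ _ _ _ _ _ _ _ (by norm_num) (by norm_num) (by norm_num) (by norm_num) (by norm_num) (by norm_num)
  by_cases h1 : s = "Butterfly-Common Jay"
  · subst h1
    have hc : (!LIFECYCLE_DURATIONS.contains "Butterfly-Common Jay") = false := by decide
    have hd : (LIFECYCLE_DURATIONS.get? "Butterfly-Common Jay").getD ([] : List Int) = [4, 5, 4, 6, 7, 12] := by decide
    simp only [get_larval_stages, get_larval_stages_alt, hc, Bool.false_eq_true, if_false, hd]
    exact stage_eq _ _ _ _ _ _ _ _ (by norm_num) (by norm_num) (by norm_num) (by norm_num) (by norm_num) (by norm_num)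
  by_cases h2 : s = "Butterfly-Common Lime"
  · subst h2
    have hc : (!LIFECYCLE_DURATIONS.contains "Butterfly-Common Lime") = false := by decide
    have hd : (LIFECYCLE_DURATIONS.get? "Butterfly-Common Lime").getD ([] : List Int) = [2, 2, 2, 2, 2, 14] := by decide
    simp only [get_larval_stages, get_larval_stages_alt, hc, Bool.false_eq_true, if_false, hd]
    exact stage_eq _ _ _ _ _ _ _ _ (by norm_num) (by norm_num) (by norm_num) (by norm_num) (by norm_num) (by norm_num)
  by_cases h3 : s = "Butterfly-Common Mime"
  · subst h3
    have hc : (!LIFECYCLE_DURATIONS.contains "Butterfly-Common Mime") = false := by decide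
    have hd : (LIFECYCLE_DURATIONS.get? "Butterfly-Common Mime").getD ([] : List Int) = [4, 4, 5, 5, 6, 18] := by decide
    simp only [get_larval_stages, get_larval_stages_alt, hc, Bool.false_eq_true, if_false, hd]
    exact stage_eq _ _ _ _ _ _ _ _ (by norm_num) (by norm_num) (by norm_num) (by norm_num) (by norm_num) (by norm_num)
  by_cases h4 : s = "Butterfly-Common Mormon"
  · subst h4
    have hc : (!LIFECYCLE_DURATIONS.contains "Butterfly-Common Mormon") = false := by decide
    have hd : (LIFECYCLE_DURATIONS.get? "Butterfly-Common Mormon").getD ([] : List Int) = [3, 4, 5, 5, 6, 16] := by decide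
    simp only [get_larval_stages, get_larval_stages_alt, hc, Bool.false_eq_true, if_false, hd]
    exact stage_eq _ _ _ _ _ _ _ _ (by norm_num) (by norm_num) (by norm_num) (by norm_num) (by norm_num) (by norm_num)
  by_cases h5 : s = "Butterfly-Emerald Swallowtail"
  · subst h5
    have hc : (!LIFECYCLE_DURATIONS.contains "Butterfly-Emerald Swallowtail") = false := by decide
    have hd : (LIFECYCLE_DURATIONS.get? "Butterfly-Emerald Swallowtail").getD ([] : List Int) = [4, 4, 5, 6, 7, 15] := by decide
    simp only [get_larval_stages, get_larval_stages_alt, hc, Bool.false_eq_true, if_false, hd]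
    exact stage_eq _ _ _ _ _ _ _ _ (by norm_num) (by norm_num) (by norm_num) (by norm_num) (by norm_num) (by norm_num)
  by_cases h6 : s = "Butterfly-Golden Birdwing"
  · subst h6
    have hc : (!LIFECYCLE_DURATIONS.contains "Butterfly-Golden Birdwing") = false := by decide
    have hd : (LIFECYCLE_DURATIONS.get? "Butterfly-Golden Birdwing").getD ([] : List Int) = [5, 6, 7, 8, 9, 25] := by decide
    simp only [get_larval_stages, get_larval_stages_alt, hc, Bool.false_eq_true, if_false, hd]
    exact stage_eq _ _ _ _ _ _ _ _ (by norm_num) (by norm_num) (by norm_num) (by norm_num) (by norm_num) (by norm_num)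
  by_cases h7 : s = "Butterfly-Gray Glassy Tiger"
  · subst h7
    have hc : (!LIFECYCLE_DURATIONS.contains "Butterfly-Gray Glassy Tiger") = false := by decide
    have hd : (LIFECYCLE_DURATIONS.get? "Butterfly-Gray Glassy Tiger").getD ([] : List Int) = [3, 4, 4, 5, 5, 13] := by decide
    simp only [get_larval_stages, get_larval_stages_alt, hc, Bool.false_eq_true, if_false, hd]
    exact stage_eq _ _ _ _ _ _ _ _ (by norm_num) (by norm_num) (by norm_num) (by norm_num) (by norm_num) (by norm_num)
  by_cases h8 : s = "Butterfly-Great Eggfly"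
  · subst h8
    have hc : (!LIFECYCLE_DURATIONS.contains "Butterfly-Great Eggfly") = false := by decide
    have hd : (LIFECYCLE_DURATIONS.get? "Butterfly-Great Eggfly").getD ([] : List Int) = [4, 5, 6, 6, 7, 20] := by decide
    simp only [get_larval_stages, get_larval_stages_alt, hc, Bool.false_eq_true, if_false, hd]
    exact stage_eq _ _ _ _ _ _ _ _ (by norm_num) (by norm_num) (by norm_num) (by norm_num) (by norm_num) (by norm_num)
  by_cases h9 : s = "Butterfly-Great Yellow Mormon"
  · subst h9
    have hc : (!LIFECYCLE_DURATIONS.contains "Butterfly-Great Yellow Mormon") = false := by decide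
    have hd : (LIFECYCLE_DURATIONS.get? "Butterfly-Great Yellow Mormon").getD ([] : List Int) = [3, 4, 5, 6, 7, 17] := by decide
    simp only [get_larval_stages, get_larval_stages_alt, hc, Bool.false_eq_true, if_false, hd]
    exact stage_eq _ _ _ _ _ _ _ _ (by norm_num) (by norm_num) (by norm_num) (by norm_num) (by norm_num) (by norm_num)
  by_cases h10 : s = "Butterfly-Paper Kite"
  · subst h10
    have hc : (!LIFECYCLE_DURATIONS.contains "Butterfly-Paper Kite") = false := by decide
    have hd : (LIFECYCLE_DURATIONS.get? "Butterfly-Paper Kite").getD ([] : List Int) = [3, 4, 5, 5, 6, 19] := by decide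
    simp only [get_larval_stages, get_larval_stages_alt, hc, Bool.false_eq_true, if_false, hd]
    exact stage_eq _ _ _ _ _ _ _ _ (by norm_num) (by norm_num) (by norm_num) (by norm_num) (by norm_num) (by norm_num)
  by_cases h11 : s = "Butterfly-Pink Rose"
  · subst h11
    have hc : (!LIFECYCLE_DURATIONS.contains "Butterfly-Pink Rose") = false := by decide
    have hd : (LIFECYCLE_DURATIONS.get? "Butterfly-Pink Rose").getD ([] : List Int) = [4, 5, 5, 6, 7, 15] := by decide
    simp only [get_larval_stages, get_larval_stages_alt, hc, Bool.false_eq_true, if_false, hd]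
    exact stage_eq _ _ _ _ _ _ _ _ (by norm_num) (by norm_num) (by norm_num) (by norm_num) (by norm_num) (by norm_num)
  by_cases h12 : s = "Butterfly-Plain Tiger"
  · subst h12
    have hc : (!LIFECYCLE_DURATIONS.contains "Butterfly-Plain Tiger") = false := by decide
    have hd : (LIFECYCLE_DURATIONS.get? "Butterfly-Plain Tiger").getD ([] : List Int) = [3, 4, 4, 5, 5, 12] := by decide
    simp only [get_larval_stages, get_larval_stages_alt, hc, Bool.false_eq_true, if_false, hd]
    exact stage_eq _ _ _ _ _ _ _ _ (by norm_num) (by norm_num) (by norm_num) (by norm_num) (by norm_num) (by norm_num)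
  by_cases h13 : s = "Butterfly-Red Lacewing"
  · subst h13
    have hc : (!LIFECYCLE_DURATIONS.contains "Butterfly-Red Lacewing") = false := by decide
    have hd : (LIFECYCLE_DURATIONS.get? "Butterfly-Red Lacewing").getD ([] : List Int) = [4, 5, 5, 6, 7, 14] := by decide
    simp only [get_larval_stages, get_larval_stages_alt, hc, Bool.false_eq_true, if_false, hd]
    exact stage_eq _ _ _ _ _ _ _ _ (by norm_num) (by norm_num) (by norm_num) (by norm_num) (by norm_num) (by norm_num)
  by_cases h14 : s = "Butterfly-Scarlet Mormon"
  · subst h14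
    have hc : (!LIFECYCLE_DURATIONS.contains "Butterfly-Scarlet Mormon") = false := by decide
    have hd : (LIFECYCLE_DURATIONS.get? "Butterfly-Scarlet Mormon").getD ([] : List Int) = [3, 4, 5, 5, 6, 16] := by decide
    simp only [get_larval_stages, get_larval_stages_alt, hc, Bool.false_eq_true, if_false, hd]
    exact stage_eq _ _ _ _ _ _ _ _ (by norm_num) (by norm_num) (by norm_num) (by norm_num) (by norm_num) (by norm_num)
  by_cases h15 : s = "Butterfly-Tailed Jay"
  · subst h15
    have hc : (!LIFECYCLE_DURATIONS.contains "Butterfly-Tailed Jay") = false := by decide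
    have hd : (LIFECYCLE_DURATIONS.get? "Butterfly-Tailed Jay").getD ([] : List Int) = [4, 5, 5, 6, 7, 13] := by decide
    simp only [get_larval_stages, get_larval_stages_alt, hc, Bool.false_eq_true, if_false, hd]
    exact stage_eq _ _ _ _ _ _ _ _ (by norm_num) (by norm_num) (by norm_num) (by norm_num) (by norm_num) (by norm_num)
  by_cases h16 : s = "Moth-Atlas"
  · subst h16
    have hc : (!LIFECYCLE_DURATIONS.contains "Moth-Atlas") = false := by decide
    have hd : (LIFECYCLE_DURATIONS.get? "Moth-Atlas").getD ([] : List Int) = [7, 8, 9, 10, 12, 30] := by decide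
    simp only [get_larval_stages, get_larval_stages_alt, hc, Bool.false_eq_true, if_false, hd]
    exact stage_eq _ _ _ _ _ _ _ _ (by norm_num) (by norm_num) (by norm_num) (by norm_num) (by norm_num) (by norm_num)
  by_cases h17 : s = "Moth-Giant Silk"
  · subst h17
    have hc : (!LIFECYCLE_DURATIONS.contains "Moth-Giant Silk") = false := by decide
    have hd : (LIFECYCLE_DURATIONS.get? "Moth-Giant Silk").getD ([] : List Int) = [6, 7, 8, 9, 10, 25] := by decide
    simp only [get_larval_stages, get_larval_stages_alt, hc, Bool.false_eq_true, if_false, hd]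
    exact stage_eq _ _ _ _ _ _ _ _ (by norm_num) (by norm_num) (by norm_num) (by norm_num) (by norm_num) (by norm_num)
  have hk : LIFECYCLE_DURATIONS.keys = ["Butterfly-Clippers", "Butterfly-Common Jay", "Butterfly-Common Lime", "Butterfly-Common Mime", "Butterfly-Common Mormon", "Butterfly-Emerald Swallowtail", "Butterfly-Golden Birdwing", "Butterfly-Gray Glassy Tiger", "Butterfly-Great Eggfly", "Butterfly-Great Yellow Mormon", "Butterfly-Paper Kite", "Butterfly-Pink Rose", "Butterfly-Plain Tiger", "Butterfly-Red Lacewing", "Butterfly-Scarlet Mormon", "Butterfly-Tailed Jay", "Moth-Atlas", "Moth-Giant Silk"] := by decide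
  have hc : (!LIFECYCLE_DURATIONS.contains s) = true := by
    rw [PySem.Dict.contains_eq_decide_mem_keys, hk]
    simp [h0, h1, h2, h3, h4, h5, h6, h7, h8, h9, h10, h11, h12, h13, h14, h15, h16, h17]
  simp only [get_larval_stages, get_larval_stages_alt, hc, if_true]
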